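-- pv_equiv track=rewrite | github.com/ESKoVV/AIAssistentsobjectAnalitick | apps/preprocessing/deduplication/engine.py | _collect_lsh_candidate_pairs
-- ===== SOURCE A (Python) =====
-- from collections import defaultdict
--
-- def _collect_lsh_candidate_pairs(
--     signatures: list[tuple[int, ...]],
--     bands: int,
-- ) -> set[tuple[int, int]]:
--     band_size = len(signatures[0]) // bands
--     buckets: dict[tuple[int, tuple[int, ...]], list[int]] = defaultdict(list)
--     candidate_pairs: set[tuple[int, int]] = set()
--
--     for index, signature in enumerate(signatures):
--         for band_index in range(bands):
--             start = band_index * band_size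
--             end = start + band_size
--             bucket_key = (band_index, signature[start:end])
--             bucket = buckets[bucket_key]
--             for other_index in bucket:
--                 candidate_pairs.add((other_index, index))
--             bucket.append(index)
--
--     return candidate_pairs
-- ===== SOURCE B (Python) =====
-- from collections import defaultdict
-- from itertools import takewhile
--
-- def _collect_lsh_candidate_pairs(
--     signatures,
--     bands,
-- ):
--     band_size = len(signatures[0]) // bands
--     # Phase 1: build the complete bucket index in one pass, no pair emission.
--     buckets = defaultdict(list)
--     for index, signature in enumerate(signatures):
--         for band_index in range(bands):
--             start = band_index * band_size
--             buckets[(band_index, signature[start:start + band_size])].append(index)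
--     # Phase 2: read-only scan over the finished index; each index pairs up
--     # with the strictly earlier members of its bucket (buckets are ascending).
--     candidate_pairs = set()
--     for index, signature in enumerate(signatures):
--         for band_index in range(bands):
--             start = band_index * band_size
--             bucket = buckets[(band_index, signature[start:start + band_size])]
--             candidate_pairs.update(
--                 (other, index) for other in takewhile(lambda o: o < index, bucket))
--     return candidate_pairs
-- ===== Notes on version B (the rewrite author's own statement) =====
-- stated objective: alternative
-- what changed: A emits candidate pairs interleaved with building the bucket dict (each index is paired against the partially-built bucket it is about to join); B is a two-phase decomposition: it first builds the complete (band, slice) -> indices index in one pass, then a second read-only pass pairs each index with the strictly earlier members of its finished bucket via itertools.takewhile.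
import Mathlib
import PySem

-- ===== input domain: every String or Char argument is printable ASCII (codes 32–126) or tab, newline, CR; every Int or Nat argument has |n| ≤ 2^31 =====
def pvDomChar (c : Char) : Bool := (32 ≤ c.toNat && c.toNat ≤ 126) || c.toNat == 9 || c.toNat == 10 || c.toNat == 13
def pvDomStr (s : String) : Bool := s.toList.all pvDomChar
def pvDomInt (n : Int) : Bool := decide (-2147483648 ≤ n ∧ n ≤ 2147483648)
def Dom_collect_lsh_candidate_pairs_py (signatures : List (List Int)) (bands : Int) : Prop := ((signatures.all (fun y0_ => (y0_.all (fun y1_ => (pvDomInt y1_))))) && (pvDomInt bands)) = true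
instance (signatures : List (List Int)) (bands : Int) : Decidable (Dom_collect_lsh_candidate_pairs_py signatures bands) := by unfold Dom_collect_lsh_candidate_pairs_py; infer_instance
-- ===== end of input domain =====

-- B builds the complete bucket index first and then emits pairs in a second, read-only
-- scan (two-phase decomposition); A emits pairs interleaved with building the index.

-- ===== PORT A =====
def collect_lsh_candidate_pairs_py (signatures : List (List Int)) (bands : Int) : List (Int × Int) :=
  -- band_size = len(signatures[0]) // bands  (signatures[0] raises on []; bands = 0 raises: both excluded by Pre_)
  match PySem.List.pyGet? signatures 0 with
  | none => []
  | some sig0 =>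
    let band_size : Int := PySem.Int.floordiv (sig0.length : Int) bands
    let st :=
      (PySem.List.enumerate signatures 0).foldl (fun st p =>
        (PySem.List.pyRange 0 bands 1).foldl (fun st band_index =>
          let start := band_index * band_size
          let stop := start + band_size
          let bucket_key : Int × List Int := (band_index, PySem.List.slice p.2 (some start) (some stop))
          let bucket := st.1.getD bucket_key []
          -- for other_index in bucket: candidate_pairs.add((other_index, index))
          let candidate_pairs := bucket.foldl (fun cp other_index => PySem.Set.add cp (other_index, p.1)) st.2
          -- bucket.append(index)
          (st.1.insert bucket_key (bucket ++ [p.1]), candidate_pairs)) st)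
        ((∅ : Std.HashMap (Int × List Int) (List Int)), (PySem.Set.empty : List (Int × Int)))
    st.2

-- ===== PORT B =====
def collect_lsh_candidate_pairs_py_alt (signatures : List (List Int)) (bands : Int) : List (Int × Int) :=
  match PySem.List.pyGet? signatures 0 with
  | none => []
  | some sig0 =>
    let band_size : Int := PySem.Int.floordiv (sig0.length : Int) bands
    -- Phase 1: full bucket index (defaultdict append = modify with default [])
    let buckets : Std.HashMap (Int × List Int) (List Int) :=
      (PySem.List.enumerate signatures 0).foldl (fun b p =>
        (PySem.List.pyRange 0 bands 1).foldl (fun b band_index =>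
          let start := band_index * band_size
          b.insert (band_index, PySem.List.slice p.2 (some start) (some (start + band_size)))
            (b.getD (band_index, PySem.List.slice p.2 (some start) (some (start + band_size))) [] ++ [p.1])) b)
        (∅ : Std.HashMap (Int × List Int) (List Int))
    -- Phase 2: pair each index with the strictly earlier members of its bucket
    (PySem.List.enumerate signatures 0).foldl (fun cp p =>
      (PySem.List.pyRange 0 bands 1).foldl (fun cp band_index =>
        let start := band_index * band_size
        let bucket := buckets.getD (band_index, PySem.List.slice p.2 (some start) (some (start + band_size))) []
        (bucket.takeWhile (fun o => decide (o < p.1))).foldl (fun cp other => PySem.Set.add cp (other, p.1)) cp) cp)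
      (PySem.Set.empty : List (Int × Int))

-- ===== PRECONDITION & SPEC =====
-- Pre_ excludes exactly the inputs where A raises: signatures = [] (IndexError on signatures[0])
-- and bands = 0 (ZeroDivisionError).
def Pre_collect_lsh_candidate_pairs_py (signatures : List (List Int)) (bands : Int) : Prop :=
  signatures ≠ [] ∧ bands ≠ 0
instance (signatures : List (List Int)) (bands : Int) : Decidable (Pre_collect_lsh_candidate_pairs_py signatures bands) := by unfold Pre_collect_lsh_candidate_pairs_py; infer_instance

def pvWitness_collect_lsh_candidate_pairs_py : List (List Int) × Int := ([[1, 2], [1, 3], [1, 2]], 2)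

def Spec_collect_lsh_candidate_pairs_py (signatures : List (List Int)) (bands : Int) (out : List (Int × Int)) : Prop := out = collect_lsh_candidate_pairs_py_alt signatures bands
instance (signatures : List (List Int)) (bands : Int) (out : List (Int × Int)) : Decidable (Spec_collect_lsh_candidate_pairs_py signatures bands out) := by unfold Spec_collect_lsh_candidate_pairs_py; infer_instance

-- ===== CLAIM (what is proved, stated in full; the proofs are below) =====
def Claim_equal_collect_lsh_candidate_pairs_py : Prop := ∀ (signatures : List (List Int)) (bands : Int), Dom_collect_lsh_candidate_pairs_py signatures bands → Pre_collect_lsh_candidate_pairs_py signatures bands → Spec_collect_lsh_candidate_pairs_py signatures bands (collect_lsh_candidate_pairs_py signatures bands)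

-- ===== LEMMAS AND PROOFS =====
def pvKey (bsz : Int) (sig : List Int) (bi : Int) : Int × List Int :=
  (bi, PySem.List.slice sig (some (bi * bsz)) (some (bi * bsz + bsz)))
def pvInner1 (bsz : Int) (i : Int) (sig : List Int)
    (b : Std.HashMap (Int × List Int) (List Int)) (bs : List Int) :
    Std.HashMap (Int × List Int) (List Int) :=
  bs.foldl (fun b bi => b.insert (pvKey bsz sig bi) (b.getD (pvKey bsz sig bi) [] ++ [i])) b

theorem pvKey_fst (bsz : Int) (sig : List Int) (bi : Int) : (pvKey bsz sig bi).1 = bi := rfl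

-- bridge: HashMap getD/insert with a propositional condition (the dicts here are only
-- looked up pointwise, never iterated, so Std.HashMap is an exact port of the Python dict)
theorem pvGetD_insert (m : Std.HashMap (Int × List Int) (List Int)) (k a : Int × List Int) (v : List Int) :
    (m.insert k v).getD a [] = if a = k then v else m.getD a [] := by
  rw [Std.HashMap.getD_insert]
  simp only [beq_iff_eq]
  by_cases h : a = k
  · simp [h]
  · rw [if_neg h, if_neg (fun he => h he.symm)]

theorem pvInner1_getD_notmem (bsz i : Int) (sig : List Int)
    (bs : List Int) : ∀ (b : Std.HashMap (Int × List Int) (List Int)) (key : Int × List Int),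
    key.1 ∉ bs →
    (pvInner1 bsz i sig b bs).getD key [] = b.getD key [] := by
  induction bs with
  | nil => intro b key h; rfl
  | cons bi bs ih =>
    intro b key h
    simp only [List.mem_cons, not_or] at h
    have hst : (pvInner1 bsz i sig b (bi :: bs)) = pvInner1 bsz i sig (b.insert (pvKey bsz sig bi) (b.getD (pvKey bsz sig bi) [] ++ [i])) bs := rfl
    rw [hst, ih _ _ h.2, pvGetD_insert]
    have hne : key ≠ pvKey bsz sig bi := by
      intro he; exact h.1 (by rw [he, pvKey_fst])
    simp [hne]

theorem pvInner1_getD (bsz i : Int) (sig : List Int)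
    (bs : List Int) : ∀ (b : Std.HashMap (Int × List Int) (List Int)) (key : Int × List Int),
    bs.Nodup →
    (pvInner1 bsz i sig b bs).getD key [] =
      b.getD key [] ++ (if key.1 ∈ bs ∧ key = pvKey bsz sig key.1 then [i] else []) := by
  induction bs with
  | nil => intro b key _; simp [pvInner1]
  | cons bi bs ih =>
    intro b key hnd
    simp only [List.nodup_cons] at hnd
    have hstep : (pvInner1 bsz i sig b (bi :: bs)) = pvInner1 bsz i sig (b.insert (pvKey bsz sig bi) (b.getD (pvKey bsz sig bi) [] ++ [i])) bs := rfl
    rw [hstep]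
    by_cases hkey : key = pvKey bsz sig bi
    · have h1 : key.1 = bi := by rw [hkey, pvKey_fst]
      have hnotbs : key.1 ∉ bs := h1 ▸ hnd.1
      rw [pvInner1_getD_notmem bsz i sig bs _ _ hnotbs, pvGetD_insert]
      have hcond : key.1 ∈ bi :: bs ∧ key = pvKey bsz sig key.1 := ⟨by simp [h1], by rw [h1]; exact hkey⟩
      rw [if_pos hkey, if_pos hcond, hkey]
    · rw [ih _ _ hnd.2, pvGetD_insert, if_neg hkey]
      congr 1
      have : (key.1 ∈ bi :: bs ∧ key = pvKey bsz sig key.1) ↔ (key.1 ∈ bs ∧ key = pvKey bsz sig key.1) := by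
        constructor
        · rintro ⟨hm, he⟩
          rcases List.mem_cons.mp hm with h1 | h1
          · exact absurd (h1 ▸ he) hkey
          · exact ⟨h1, he⟩
        · rintro ⟨hm, he⟩; exact ⟨List.mem_cons_of_mem _ hm, he⟩
      simp only [this]

def pvInnerA (bsz : Int) (i : Int) (sig : List Int)
    (st : Std.HashMap (Int × List Int) (List Int) × List (Int × Int)) (bs : List Int) :
    Std.HashMap (Int × List Int) (List Int) × List (Int × Int) :=
  bs.foldl (fun st bi =>
    (st.1.insert (pvKey bsz sig bi) (st.1.getD (pvKey bsz sig bi) [] ++ [i]),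
     (st.1.getD (pvKey bsz sig bi) []).foldl (fun cp o => PySem.Set.add cp (o, i)) st.2)) st

theorem pvInnerA_eq (bsz i : Int) (sig : List Int)
    (bs : List Int) : ∀ (b : Std.HashMap (Int × List Int) (List Int)) (s : List (Int × Int)),
    bs.Nodup →
    pvInnerA bsz i sig (b, s) bs =
      (pvInner1 bsz i sig b bs,
       bs.foldl (fun s bi => (b.getD (pvKey bsz sig bi) []).foldl (fun cp o => PySem.Set.add cp (o, i)) s) s) := by
  induction bs with
  | nil => intro b s _; rfl
  | cons bi bs ih =>
    intro b s hnd
    simp only [List.nodup_cons] at hnd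
    have hstep : pvInnerA bsz i sig (b, s) (bi :: bs) =
        pvInnerA bsz i sig
          (b.insert (pvKey bsz sig bi) (b.getD (pvKey bsz sig bi) [] ++ [i]),
           (b.getD (pvKey bsz sig bi) []).foldl (fun cp o => PySem.Set.add cp (o, i)) s) bs := rfl
    rw [hstep, ih _ _ hnd.2]
    rw [Prod.mk.injEq]
    refine ⟨rfl, ?_⟩
    rw [List.foldl_cons]
    apply PySem.List.foldl_congr_mem
    intro acc bj hbj
    have hne : pvKey bsz sig bj ≠ pvKey bsz sig bi := by
      intro he
      have hb : bj = bi := by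
        have := congrArg Prod.fst he; simpa [pvKey_fst] using this
      exact hnd.1 (hb ▸ hbj)
    rw [pvGetD_insert, if_neg hne]

def pvHit (bands bsz : Int) (sig : List Int) (key : Int × List Int) : Bool :=
  decide (0 ≤ key.1) && decide (key.1 < bands) && decide (key = pvKey bsz sig key.1)
def pvContrib (bands bsz : Int) (items : List (Int × List Int)) (key : Int × List Int) : List Int :=
  (items.filter (fun p => pvHit bands bsz p.2 key)).map (·.1)
def pvBld (bands bsz : Int) (items : List (Int × List Int))
    (b : Std.HashMap (Int × List Int) (List Int)) : Std.HashMap (Int × List Int) (List Int) :=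
  items.foldl (fun b p => pvInner1 bsz p.1 p.2 b (PySem.List.pyRange 0 bands 1)) b

theorem pvContrib_cons (bands bsz : Int) (p : Int × List Int) (items : List (Int × List Int)) (key : Int × List Int) :
    pvContrib bands bsz (p :: items) key =
      (if pvHit bands bsz p.2 key then [p.1] else []) ++ pvContrib bands bsz items key := by
  by_cases h : pvHit bands bsz p.2 key <;> simp [pvContrib, h]

theorem pvInner1_getD_range (bands bsz i : Int) (sig : List Int)
    (b : Std.HashMap (Int × List Int) (List Int)) (key : Int × List Int) :
    (pvInner1 bsz i sig b (PySem.List.pyRange 0 bands 1)).getD key [] =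
      b.getD key [] ++ (if pvHit bands bsz sig key then [i] else []) := by
  rw [pvInner1_getD bsz i sig _ b key (PySem.List.nodup_pyRange_one 0 bands)]
  congr 1
  have : (key.1 ∈ PySem.List.pyRange 0 bands 1 ∧ key = pvKey bsz sig key.1) ↔ pvHit bands bsz sig key := by
    rw [PySem.List.mem_pyRange_one]
    simp [pvHit, and_assoc]
  simp only [this]

theorem pvBld_getD (bands bsz : Int) (items : List (Int × List Int)) :
    ∀ (b : Std.HashMap (Int × List Int) (List Int)) (key : Int × List Int),
    (pvBld bands bsz items b).getD key [] = b.getD key [] ++ pvContrib bands bsz items key := by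
  induction items with
  | nil => intro b key; simp [pvBld, pvContrib]
  | cons p items ih =>
    intro b key
    have hstep : pvBld bands bsz (p :: items) b = pvBld bands bsz items (pvInner1 bsz p.1 p.2 b (PySem.List.pyRange 0 bands 1)) := rfl
    rw [hstep, ih, pvInner1_getD_range, pvContrib_cons, List.append_assoc]

theorem pvContrib_mem_ge (bands bsz : Int) (sigs : List (List Int)) : ∀ (k : Int) (key : Int × List Int)
    (o : Int), o ∈ pvContrib bands bsz (PySem.List.enumerate sigs k) key → k ≤ o := by
  induction sigs with
  | nil => intro k key o h; simp [PySem.List.enumerate, pvContrib] at h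
  | cons sig sigs ih =>
    intro k key o h
    rw [PySem.List.enumerate_cons, pvContrib_cons] at h
    rcases List.mem_append.mp h with h1 | h1
    · split at h1
      · simp at h1; omega
      · simp at h1
    · have := ih (k + 1) key o h1; omega

theorem pvTakeWhile_append (pre : List Int) : ∀ (post : List Int) (k : Int),
    (∀ o ∈ pre, o < k) → (∀ o ∈ post, k ≤ o) →
    (pre ++ post).takeWhile (fun o => decide (o < k)) = pre := by
  induction pre with
  | nil =>
    intro post k _ h2
    cases post with
    | nil => rfl
    | cons q post =>
      have : ¬ (q < k) := by have := h2 q (by simp); omega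
      simp [this]
  | cons p pre ih =>
    intro post k h1 h2
    have hp : p < k := h1 p (by simp)
    simp only [List.cons_append, List.takeWhile_cons, decide_eq_true_eq, hp, if_pos]
    rw [ih post k (fun o ho => h1 o (by simp [ho])) h2]

theorem pvMain (bands bsz : Int) (full : Std.HashMap (Int × List Int) (List Int)) :
    ∀ (rest : List (List Int)) (k : Int) (b : Std.HashMap (Int × List Int) (List Int)) (s : List (Int × Int)),
    (∀ key, full.getD key [] = b.getD key [] ++ pvContrib bands bsz (PySem.List.enumerate rest k) key) →
    (∀ key o, o ∈ b.getD key [] → o < k) →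
    ((PySem.List.enumerate rest k).foldl (fun st p => pvInnerA bsz p.1 p.2 st (PySem.List.pyRange 0 bands 1)) (b, s)).2 =
      (PySem.List.enumerate rest k).foldl (fun cp p =>
        (PySem.List.pyRange 0 bands 1).foldl (fun cp bi =>
          ((full.getD (pvKey bsz p.2 bi) []).takeWhile (fun o => decide (o < p.1))).foldl
            (fun cp o => PySem.Set.add cp (o, p.1)) cp) cp) s := by
  intro rest
  induction rest with
  | nil => intro k b s _ _; rfl
  | cons sig rest ih =>
    intro k b s hinv hlt
    rw [PySem.List.enumerate_cons]
    rw [List.foldl_cons, List.foldl_cons]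
    -- head step, A side
    rw [pvInnerA_eq bsz k sig _ b s (PySem.List.nodup_pyRange_one 0 bands)]
    -- head step, B side equals A side pointwise
    have hbkt : ∀ bi : Int, (full.getD (pvKey bsz sig bi) []).takeWhile (fun o => decide (o < k))
        = b.getD (pvKey bsz sig bi) [] := by
      intro bi
      rw [hinv (pvKey bsz sig bi)]
      exact pvTakeWhile_append _ _ k (fun o ho => hlt _ o ho)
        (fun o ho => pvContrib_mem_ge bands bsz (sig :: rest) k _ o ho)
    have hhead : (PySem.List.pyRange 0 bands 1).foldl (fun cp bi =>
          ((full.getD (pvKey bsz sig bi) []).takeWhile (fun o => decide (o < k))).foldl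
            (fun cp o => PySem.Set.add cp (o, k)) cp) s
        = (PySem.List.pyRange 0 bands 1).foldl
            (fun s bi => (b.getD (pvKey bsz sig bi) []).foldl (fun cp o => PySem.Set.add cp (o, k)) s) s := by
      apply PySem.List.foldl_congr_mem
      intro acc bi _
      rw [hbkt bi]
    rw [hhead]
    -- tail: apply IH at k+1 with the updated bucket dict
    apply ih (k + 1)
    · intro key
      rw [hinv key, pvInner1_getD_range, PySem.List.enumerate_cons, pvContrib_cons, List.append_assoc]
    · intro key o ho
      rw [pvInner1_getD_range] at ho
      rcases List.mem_append.mp ho with h1 | h1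
      · have := hlt key o h1; omega
      · split at h1
        · simp at h1; omega
        · simp at h1

-- ===== VERDICT (by name: the statement is the Claim_ definition above) =====
theorem collect_lsh_candidate_pairs_py_spec : Claim_equal_collect_lsh_candidate_pairs_py := by
  unfold Claim_equal_collect_lsh_candidate_pairs_py
  intro signatures bands _ _
  unfold Spec_collect_lsh_candidate_pairs_py
  unfold collect_lsh_candidate_pairs_py collect_lsh_candidate_pairs_py_alt
  cases h : PySem.List.pyGet? signatures 0 with
  | none => rfl
  | some sig0 =>
    exact pvMain bands (PySem.Int.floordiv (sig0.length : Int) bands)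
      (pvBld bands (PySem.Int.floordiv (sig0.length : Int) bands) (PySem.List.enumerate signatures 0) (∅ : Std.HashMap (Int × List Int) (List Int)))
      signatures 0 (∅ : Std.HashMap (Int × List Int) (List Int)) []
      (fun key => by rw [pvBld_getD, Std.HashMap.getD_empty])
      (fun key o ho => by rw [Std.HashMap.getD_empty] at ho; simp at ho)
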